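-- pv_equiv track=rewrite | github.com/an-dhyun/Dohyun-s-BOJ | chap06/1316.py | find
-- ===== SOURCE A (Python) =====
-- def find(word, target):
--     answer = []
--     index = -1
--     check = True
--     while True:
--         index = word.find(target, index + 1)
--         if index == -1: break
--         else: answer.append(index)
--     for i in range(len(answer)-1):
--         if answer[i+1]-answer[i] != 1: check = False
--     return check
-- ===== SOURCE B (Python) =====
-- def find(word, target):
--     # Case analysis on the pattern instead of collecting occurrence indices:
--     # an empty pattern occurs at every position (contiguous); a pattern with two
--     # different characters can never occur at two adjacent positions, so its
--     # occurrences are contiguous iff there is at most one; a uniform pattern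
--     # c*m occurs contiguously iff no occurrence starts after the first c-run.
--     if not target:
--         return True
--     f = word.find(target)
--     if f == -1:
--         return True
--     c = target[0]
--     if any(ch != c for ch in target):
--         return word.find(target, f + 1) == -1
--     g = f + len(target)
--     while g < len(word) and word[g] == c:
--         g += 1
--     return word.find(target, g) == -1
-- ===== Notes on version B (the rewrite author's own statement) =====
-- stated objective: alternative
-- what changed: Instead of collecting every occurrence index and scanning pairwise differences, B does a case analysis on the pattern: empty pattern is trivially contiguous; a pattern with two distinct characters can never occur at adjacent positions, so contiguity means at most one occurrence (checked by a second find); a uniform pattern c*m is contiguous iff no occurrence starts after the end of the first c-run (found by one char scan).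
import Mathlib
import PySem

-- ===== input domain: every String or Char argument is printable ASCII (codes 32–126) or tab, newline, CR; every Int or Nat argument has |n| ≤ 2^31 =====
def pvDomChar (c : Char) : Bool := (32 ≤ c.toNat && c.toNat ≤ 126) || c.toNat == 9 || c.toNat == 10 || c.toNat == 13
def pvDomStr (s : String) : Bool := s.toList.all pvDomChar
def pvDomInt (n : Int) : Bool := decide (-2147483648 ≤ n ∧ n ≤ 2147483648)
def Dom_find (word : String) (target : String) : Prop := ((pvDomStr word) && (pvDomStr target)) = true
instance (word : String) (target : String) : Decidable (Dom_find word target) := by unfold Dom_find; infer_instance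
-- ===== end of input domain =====

-- B replaces A's occurrence-list + pairwise-difference scan by a case analysis on the
-- pattern (empty / non-uniform / uniform) using at most two finds and one run scan
-- (objective: alternative).

-- ===== PORT A =====
-- A's 'while True' loop: each successful find strictly increases index (bounded by len(word)),
-- so len(word) + 2 iterations always suffice; the fuel is a totality guard only, never reached.
def findLoopA (word : String) (target : String) : Nat → Int → List Int → List Int
  | 0, _, answer => answer
  | fuel + 1, index, answer =>
    let index' := PySem.Str.findFrom word target (index + 1) none
    if index' = -1 then answer
    else findLoopA word target fuel index' (answer ++ [index'])

def find (word : String) (target : String) : Bool :=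
  let answer := findLoopA word target (word.toList.length + 2) (-1) []
  (PySem.List.pyRange 0 ((answer.length : Int) - 1) 1).foldl
    (fun check i =>
      if PySem.List.pyGetD answer (i + 1) 0 - PySem.List.pyGetD answer i 0 ≠ 1 then false
      else check) true

-- ===== PORT B =====
-- the 'while g < len(word) and word[g] == c: g += 1' loop of Source B; word[g] with
-- 0 ≤ g < len(word) is ported exactly by PySem.List.pyGet?
def runEndB (cs : List Char) (c : Char) (g : Int) : Int :=
  if h : g < (cs.length : Int) ∧ PySem.List.pyGet? cs g = some c then runEndB cs c (g + 1)
  else g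
termination_by ((cs.length : Int) - g).toNat
decreasing_by omega

def find_alt (word : String) (target : String) : Bool :=
  if target.toList.isEmpty then true
  else
    let f := PySem.Str.findFrom word target 0 none
    if f = -1 then true
    else
      -- target[0]: target is nonempty here, so headD is exact
      let c := target.toList.headD ' '
      if target.toList.any (fun ch => ch ≠ c) then
        decide (PySem.Str.findFrom word target (f + 1) none = -1)
      else
        let g := runEndB word.toList c (f + (target.toList.length : Int))
        decide (PySem.Str.findFrom word target g none = -1)

-- ===== PRECONDITION & SPEC =====
def Spec_find (word : String) (target : String) (out : Bool) : Prop := out = find_alt word target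
instance (word : String) (target : String) (out : Bool) : Decidable (Spec_find word target out) := by unfold Spec_find; infer_instance

-- ===== CLAIM (what is proved, stated in full; the proofs are below) =====
def Claim_equal_find : Prop := ∀ (word : String) (target : String), Dom_find word target → Spec_find word target (find word target)

-- ===== LEMMAS AND PROOFS =====

-- the occurrence predicate and the occurrence list A collects
def occP (word target : String) (i : Int) : Bool :=
  PySem.Chars.startswith (word.toList.drop i.toNat) target.toList

def occL (word target : String) : List Int :=
  (PySem.List.pyRange 0 ((word.toList.length : Int) + 1) 1).filter (occP word target)

lemma occL_sorted (word target : String) : (occL word target).Pairwise (· < ·) :=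
  (PySem.List.pairwise_lt_pyRange_one _ _).filter _

-- findFrom with start = len + 1 (only reached after the empty target was found at len)
lemma findFrom_past (cs ts : List Char) :
    PySem.Chars.findFrom cs ts ((cs.length : Int) + 1) none = -1 := by
  simp [PySem.Chars.findFrom]
  omega

-- A's loop, started at index s - 1, appends exactly the occurrences in [s, n]
lemma findLoopA_eq (word target : String) :
    ∀ (fuel s : Nat) (ans : List Int), s ≤ word.toList.length + 1 →
      word.toList.length + 1 - s < fuel →
      findLoopA word target fuel ((s : Int) - 1) ans =
        ans ++ (PySem.List.pyRange (s : Int) ((word.toList.length : Int) + 1) 1).filter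
          (occP word target) := by
  intro fuel
  induction fuel with
  | zero => intro s ans hs hf; omega
  | succ fuel ih =>
    intro s ans hs hf
    rw [findLoopA]
    have hstep : (s : Int) - 1 + 1 = (s : Int) := by ring
    rw [hstep, PySem.Str.findFrom_eq]
    by_cases hsl : s ≤ word.toList.length
    · rw [PySem.Chars.findFrom_natCast _ _ s hsl]
      by_cases hf0 : PySem.Chars.find (word.toList.drop s) target.toList = -1
      · rw [if_pos (by rw [if_pos hf0])]
        have hnil : (PySem.List.pyRange (s : Int) ((word.toList.length : Int) + 1) 1).filter
            (occP word target) = [] := by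
          rw [List.filter_eq_nil_iff]
          intro i hi
          rw [PySem.List.mem_pyRange_one] at hi
          intro hP
          have hpre : target.toList <+: word.toList.drop i.toNat :=
            (PySem.Chars.startswith_iff _ _).mp hP
          have hdrop : word.toList.drop i.toNat = (word.toList.drop s).drop (i.toNat - s) := by
            rw [List.drop_drop]; congr 1; omega
          have hex : ∃ j, target.toList <+: (word.toList.drop s).drop j :=
            ⟨i.toNat - s, hdrop ▸ hpre⟩
          have hin := (PySem.Chars.exists_prefix_drop_iff_isIn _ _).mp hex
          rw [PySem.Chars.isIn_iff_infix] at hin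
          exact (PySem.Chars.find_eq_neg_one_iff _ _).mp hf0 hin
        rw [hnil, List.append_nil]
      · have hge : (0:Int) ≤ PySem.Chars.find (word.toList.drop s) target.toList := by
          have := PySem.Chars.neg_one_le_find (word.toList.drop s) target.toList
          omega
        set f := PySem.Chars.find (word.toList.drop s) target.toList with hfdef
        have hfle : f ≤ ((word.toList.drop s).length : Int) := PySem.Chars.find_le_length _ _
        rw [List.length_drop] at hfle
        rw [if_neg (by rw [if_neg hf0]; omega)]
        rw [if_neg hf0]
        have hspec := PySem.Chars.find_spec (s := word.toList.drop s) (sub := target.toList) hge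
        have hrec : (s : Int) + f = ((s + f.toNat + 1 : Nat) : Int) - 1 := by
          push_cast; omega
        rw [hrec, ih (s + f.toNat + 1) (ans ++ [((s + f.toNat + 1 : Nat) : Int) - 1]) (by omega) (by omega)]
        rw [show ((s + f.toNat + 1 : Nat) : Int) = (s:Int) + f + 1 from by push_cast; omega]
        have hsplit : (PySem.List.pyRange (s : Int) ((word.toList.length : Int) + 1) 1).filter
            (occP word target) =
            ((s:Int) + f) :: (PySem.List.pyRange ((s:Int) + f + 1) ((word.toList.length : Int) + 1) 1).filter
              (occP word target) := by
          rw [PySem.List.pyRange_one_append (s : Int) ((s:Int) + f) ((word.toList.length : Int) + 1)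
              (by omega) (by omega),
            PySem.List.pyRange_one_append ((s:Int) + f) ((s:Int) + f + 1) ((word.toList.length : Int) + 1)
              (by omega) (by omega),
            List.filter_append, List.filter_append]
          have h1 : (PySem.List.pyRange (s : Int) ((s:Int) + f) 1).filter (occP word target) = [] := by
            rw [List.filter_eq_nil_iff]
            intro i hi
            rw [PySem.List.mem_pyRange_one] at hi
            intro hP
            have hpre : target.toList <+: word.toList.drop i.toNat :=
              (PySem.Chars.startswith_iff _ _).mp hP
            have hdrop : word.toList.drop i.toNat = (word.toList.drop s).drop (i.toNat - s) := by
              rw [List.drop_drop]; congr 1; omega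
            exact hspec.2 (i.toNat - s) (by omega) (hdrop ▸ hpre)
          have h2 : (PySem.List.pyRange ((s:Int) + f) ((s:Int) + f + 1) 1).filter (occP word target) =
              [(s:Int) + f] := by
            rw [PySem.List.pyRange_one_singleton]
            have hP : occP word target ((s:Int) + f) = true := by
              rw [occP, PySem.Chars.startswith_iff]
              have h0 := hspec.1
              rw [List.drop_drop] at h0
              have hcast : ((s:Int) + f).toNat = s + f.toNat := by omega
              rw [hcast]
              exact h0
            simp [hP]
          rw [h1, h2]
          simp
        rw [show (s:Int) + f + 1 - 1 = (s:Int) + f from by ring, hsplit]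
        simp
    · have hpast : PySem.Chars.findFrom word.toList target.toList (s : Int) none = -1 := by
        rw [show (s:Int) = (word.toList.length:Int) + 1 from by omega]
        exact findFrom_past _ _
      rw [if_pos hpast, PySem.List.pyRange_one_eq_nil (by omega), List.filter_nil, List.append_nil]

-- the flag-carrying for-loop of A is an 'all' over the range
lemma foldl_flag (Q : Int → Prop) [DecidablePred Q] :
    ∀ (xs : List Int) (c : Bool),
      xs.foldl (fun check i => if Q i then false else check) c =
        (c && xs.all (fun i => ! decide (Q i))) := by
  intro xs
  induction xs with
  | nil => intro c; simp
  | cons x xs ih =>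
      intro c
      simp only [List.foldl_cons, List.all_cons, ih]
      by_cases h : Q x <;> simp [h]

-- index-wise consecutive-difference condition
def Cond (l : List Int) : Prop := ∀ k : Nat, k + 1 < l.length → l.getD (k + 1) 0 - l.getD k 0 = 1

lemma cond_cons_cons (a b : Int) (t : List Int) :
    Cond (a :: b :: t) ↔ (b - a = 1 ∧ Cond (b :: t)) := by
  constructor
  · intro h
    refine ⟨by simpa using h 0 (by simp), fun k hk => ?_⟩
    simpa using h (k + 1) (by simpa using Nat.succ_lt_succ hk)
  · rintro ⟨h1, h2⟩ k hk
    cases k with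
    | zero => simpa using h1
    | succ k => simpa using h2 k (by simpa using Nat.lt_of_succ_lt_succ hk)

-- the for-loop check of A, over any list
lemma check_iff (l : List Int) :
    ((PySem.List.pyRange 0 ((l.length : Int) - 1) 1).foldl
      (fun check i =>
        if PySem.List.pyGetD l (i + 1) 0 - PySem.List.pyGetD l i 0 ≠ 1 then false
        else check) true) = true ↔ Cond l := by
  rw [foldl_flag (fun i => PySem.List.pyGetD l (i + 1) 0 - PySem.List.pyGetD l i 0 ≠ 1)]
  simp only [Bool.true_and, List.all_eq_true, Bool.not_eq_eq_eq_not, Bool.not_true,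
    decide_eq_false_iff_not, not_not]
  constructor
  · intro h k hk
    have hmem : ((k : Int)) ∈ PySem.List.pyRange 0 ((l.length : Int) - 1) 1 := by
      rw [PySem.List.mem_pyRange_one]; omega
    have := h _ hmem
    rw [PySem.List.pyGetD_of_nonneg _ _ (by omega),
        PySem.List.pyGetD_of_nonneg _ _ (by omega)] at this
    have h1 : ((k : Int) + 1).toNat = k + 1 := by omega
    have h2 : ((k : Int)).toNat = k := by omega
    rwa [h1, h2] at this
  · intro h i hi
    rw [PySem.List.mem_pyRange_one] at hi
    rw [PySem.List.pyGetD_of_nonneg _ _ (by omega),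
        PySem.List.pyGetD_of_nonneg _ _ (by omega)]
    have h1 : (i + 1).toNat = i.toNat + 1 := by omega
    rw [h1]
    refine h i.toNat (by omega)

-- A's value in terms of occL
lemma find_iff (word target : String) :
    find word target = true ↔ Cond (occL word target) := by
  have hans : findLoopA word target (word.toList.length + 2) (-1) [] = occL word target := by
    simpa [occL] using
      findLoopA_eq word target (word.toList.length + 2) 0 [] (by omega) (by omega)
  rw [show find word target = ((PySem.List.pyRange 0
      (((findLoopA word target (word.toList.length + 2) (-1) []).length : Int) - 1) 1).foldl
      (fun check i =>
        if PySem.List.pyGetD (findLoopA word target (word.toList.length + 2) (-1) []) (i + 1) 0 -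
            PySem.List.pyGetD (findLoopA word target (word.toList.length + 2) (-1) []) i 0 ≠ 1
        then false else check) true) from rfl]
  rw [hans]
  exact check_iff _

-- Cond on a strictly sorted list = closure under integer intervals
def IC (l : List Int) : Prop := ∀ a ∈ l, ∀ b ∈ l, ∀ x : Int, a ≤ x → x ≤ b → x ∈ l

lemma cond_iff_IC (l : List Int) (hs : l.Pairwise (· < ·)) : Cond l ↔ IC l := by
  induction l with
  | nil => simp [Cond, IC]
  | cons a t ih =>
    cases t with
    | nil =>
      constructor
      · intro _ p hp q hq x hpx hxq
        simp only [List.mem_singleton] at hp hq ⊢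
        omega
      · intro _ k hk; simp at hk
    | cons b t =>
      have hab : a < b := (List.pairwise_cons.mp hs).1 b (by simp)
      have hmin : ∀ y ∈ b :: t, b ≤ y := by
        intro y hy
        rcases List.mem_cons.mp hy with h | h
        · omega
        · exact le_of_lt ((List.pairwise_cons.mp (List.pairwise_cons.mp hs).2).1 y h)
      have hs' : (b :: t).Pairwise (· < ·) := (List.pairwise_cons.mp hs).2
      rw [cond_cons_cons, ih hs']
      constructor
      · rintro ⟨h1, hic⟩ p hp q hq x hpx hxq
        by_cases hxa : x = a
        · simp [hxa]
        · have hxb : b ≤ x := by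
            rcases List.mem_cons.mp hp with h | h
            · omega
            · exact le_trans (hmin p h) hpx
          have hq' : q ∈ b :: t := by
            rcases List.mem_cons.mp hq with h | h
            · omega
            · exact h
          exact List.mem_cons_of_mem a (hic b (by simp) q hq' x hxb hxq)
      · intro hic
        constructor
        · have hmem : a + 1 ∈ a :: b :: t :=
            hic a (by simp) b (by simp) (a + 1) (by omega) (by omega)
          rcases List.mem_cons.mp hmem with h | h
          · omega
          · have := hmin _ h; omega
        · intro p hp q hq x hpx hxq
          have hx : x ∈ a :: b :: t :=
            hic p (List.mem_cons_of_mem a hp) q (List.mem_cons_of_mem a hq) x hpx hxq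
          rcases List.mem_cons.mp hx with h | h
          · have := hmin p hp; omega
          · exact h

-- membership in occL
lemma mem_occL (word target : String) (x : Int) :
    x ∈ occL word target ↔
      0 ≤ x ∧ x ≤ (word.toList.length : Int) ∧
        target.toList <+: word.toList.drop x.toNat := by
  rw [occL, List.mem_filter, PySem.List.mem_pyRange_one, occP, PySem.Chars.startswith_iff]
  exact ⟨fun ⟨⟨h1, h2⟩, h3⟩ => ⟨h1, by omega, h3⟩, fun ⟨h1, h2, h3⟩ => ⟨⟨h1, by omega⟩, h3⟩⟩

-- an occurrence of a nonempty target fits inside the word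
lemma occ_fits (word target : String) (i : Nat) (hne : target.toList ≠ [])
    (h : target.toList <+: word.toList.drop i) :
    i + target.toList.length ≤ word.toList.length := by
  have := h.length_le
  rw [List.length_drop] at this
  have : target.toList.length ≠ 0 := by simpa using hne
  omega

-- pointwise reading of a prefix
lemma prefix_getElem {p l : List Char} (h : p <+: l) (k : Nat) (hk : k < p.length) :
    l[k]? = some p[k] := by
  obtain ⟨s, rfl⟩ := h
  rw [List.getElem?_append_left hk, List.getElem?_eq_getElem hk]

-- a target occurring at two adjacent positions is uniform
lemma getElem_zero_headD (l : List Char) (h : 0 < l.length) : l[0]'h = l.headD ' ' := by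
  cases l with
  | nil => simp at h
  | cons c cs => simp

lemma adjacent_uniform (word target : String) (i : Nat)
    (h1 : target.toList <+: word.toList.drop i)
    (h2 : target.toList <+: word.toList.drop (i + 1)) :
    ∀ ch ∈ target.toList, ch = target.toList.headD ' ' := by
  have key : ∀ k, (hk : k < target.toList.length) →
      target.toList[k] = target.toList.headD ' ' := by
    intro k
    induction k with
    | zero =>
      intro hk
      exact getElem_zero_headD _ hk
    | succ k ihk =>
      intro hk
      have hkk : k < target.toList.length := by omega
      have e1 := prefix_getElem h1 (k + 1) hk
      have e2 := prefix_getElem h2 k hkk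
      rw [List.getElem?_drop] at e1 e2
      rw [show i + 1 + k = i + (k + 1) from by omega] at e2
      rw [e1] at e2
      rw [← ihk hkk]
      exact Option.some.inj e2
  intro ch hch
  obtain ⟨k, hk, rfl⟩ := List.getElem_of_mem hch
  exact key k hk

-- spec of the run-scanning loop of B
lemma runEndB_spec (cs : List Char) (c : Char) :
    ∀ (d : Nat) (g : Int), 0 ≤ g → g ≤ (cs.length : Int) → ((cs.length : Int) - g).toNat ≤ d →
      g ≤ runEndB cs c g ∧ runEndB cs c g ≤ (cs.length : Int) ∧
      (∀ i : Int, g ≤ i → i < runEndB cs c g → cs[i.toNat]? = some c) ∧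
      (runEndB cs c g = (cs.length : Int) ∨ cs[(runEndB cs c g).toNat]? ≠ some c) := by
  intro d
  induction d with
  | zero =>
    intro g h0 h1 h2
    have hg : g = (cs.length : Int) := by omega
    rw [runEndB, dif_neg (by omega)]
    exact ⟨le_refl _, h1, fun i hi1 hi2 => by omega, Or.inl hg⟩
  | succ d ih =>
    intro g h0 h1 h2
    rw [runEndB]
    by_cases hcond : g < (cs.length : Int) ∧ PySem.List.pyGet? cs g = some c
    · rw [dif_pos hcond]
      obtain ⟨ih1, ih2, ih3, ih4⟩ := ih (g + 1) (by omega) (by omega) (by omega)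
      refine ⟨by omega, ih2, ?_, ih4⟩
      intro i hi1 hi2
      by_cases hig : g + 1 ≤ i
      · exact ih3 i hig hi2
      · have hieq : i = g := by omega
        subst hieq
        have hc := hcond.2
        rw [PySem.List.pyGet?, PySem.List.pyIdx?] at hc
        rw [if_pos (by omega), if_pos (by omega)] at hc
        simpa using hc
    · rw [dif_neg hcond]
      refine ⟨le_refl _, h1, fun i hi1 hi2 => by omega, ?_⟩
      by_cases hgl : g < (cs.length : Int)
      · refine Or.inr ?_
        have hc : ¬ PySem.List.pyGet? cs g = some c := fun h => hcond ⟨hgl, h⟩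
        rw [PySem.List.pyGet?, PySem.List.pyIdx?] at hc
        rw [if_pos (by omega), if_pos (by omega)] at hc
        simpa using hc
      · exact Or.inl (by omega)

-- no occurrence from position k onwards ↔ findFrom k = -1
lemma findFrom_none_iff (word target : String) (k : Nat) (hk : k ≤ word.toList.length) :
    PySem.Chars.findFrom word.toList target.toList (k : Int) none = -1 ↔
      ∀ j : Nat, k ≤ j → ¬ target.toList <+: word.toList.drop j := by
  rw [PySem.Chars.findFrom_natCast_eq_neg_one_iff _ _ k hk]
  rw [← PySem.Chars.isIn_iff_infix, ← PySem.Chars.exists_prefix_drop_iff_isIn]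
  constructor
  · intro h j hj hp
    exact h ⟨j - k, by rw [List.drop_drop, show k + (j - k) = j from by omega]; exact hp⟩
  · rintro h ⟨j, hj⟩
    rw [List.drop_drop] at hj
    exact h (k + j) (by omega) hj

-- B's value in terms of occurrences (Cond of occL)
lemma find_alt_iff (word target : String) :
    find_alt word target = true ↔ Cond (occL word target) := by
  have hB : find_alt word target =
      (if target.toList.isEmpty then true
       else if PySem.Str.findFrom word target 0 none = -1 then true
       else if target.toList.any (fun ch => ch ≠ target.toList.headD ' ') then
         decide (PySem.Str.findFrom word target (PySem.Str.findFrom word target 0 none + 1) none = -1)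
       else
         decide (PySem.Str.findFrom word target
           (runEndB word.toList (target.toList.headD ' ')
             (PySem.Str.findFrom word target 0 none + (target.toList.length : Int))) none = -1)) := rfl
  rw [hB, cond_iff_IC _ (occL_sorted word target)]
  by_cases hemp : target.toList.isEmpty
  · -- empty target: every position is an occurrence; both sides true
    rw [if_pos hemp]
    simp only [true_iff]
    intro a ha b hb x hax hxb
    rw [mem_occL] at ha hb ⊢
    rw [List.isEmpty_iff.mp hemp]
    exact ⟨by omega, by omega, List.nil_prefix⟩
  · have htsne : target.toList ≠ [] := by simpa using hemp
    have hm1 : 1 ≤ target.toList.length := by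
      have : target.toList.length ≠ 0 := by simpa using htsne
      omega
    rw [if_neg hemp, PySem.Str.findFrom_eq, PySem.Chars.findFrom_zero]
    by_cases hf : PySem.Chars.find word.toList target.toList = -1
    · -- no occurrence at all: occL = [], both sides true
      rw [if_pos hf]
      simp only [true_iff]
      have hnil : occL word target = [] := by
        rw [List.eq_nil_iff_forall_not_mem]
        intro x hx
        rw [mem_occL] at hx
        have hin := (PySem.Chars.exists_prefix_drop_iff_isIn target.toList word.toList).mp
          ⟨x.toNat, hx.2.2⟩
        rw [PySem.Chars.isIn_iff_infix] at hin
        exact (PySem.Chars.find_eq_neg_one_iff _ _).mp hf hin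
      rw [hnil]
      intro a ha; simp at ha
    · rw [if_neg hf]
      have hge : (0:Int) ≤ PySem.Chars.find word.toList target.toList := by
        have := PySem.Chars.neg_one_le_find word.toList target.toList; omega
      obtain ⟨hocc_f, hmin_f⟩ :=
        PySem.Chars.find_spec (s := word.toList) (sub := target.toList) hge
      set f := PySem.Chars.find word.toList target.toList with hfdef
      have hffit : f.toNat + target.toList.length ≤ word.toList.length :=
        occ_fits word target f.toNat htsne hocc_f
      have hfm : f ∈ occL word target := by
        rw [mem_occL]; exact ⟨hge, by omega, hocc_f⟩
      have hminL : ∀ x ∈ occL word target, f ≤ x := by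
        intro x hx
        rw [mem_occL] at hx
        by_contra hlt
        exact hmin_f x.toNat (by omega) hx.2.2
      by_cases huni : target.toList.any (fun ch => ch ≠ target.toList.headD ' ')
      · -- non-uniform target: occurrences can never be adjacent
        rw [if_pos huni, PySem.Str.findFrom_eq]
        rw [show f + 1 = ((f.toNat + 1 : Nat) : Int) from by omega]
        rw [decide_eq_true_iff, findFrom_none_iff word target (f.toNat + 1) (by omega)]
        have hnoadj : ∀ i : Nat, target.toList <+: word.toList.drop i →
            ¬ target.toList <+: word.toList.drop (i + 1) := by
          intro i h1 h2
          have hall := adjacent_uniform word target i h1 h2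
          rw [List.any_eq_true] at huni
          obtain ⟨ch, hch, hne⟩ := huni
          have : ch ≠ target.toList.headD ' ' := by simpa using hne
          exact this (hall ch hch)
        constructor
        · -- at most one occurrence → IC
          intro h p hp q hq x hpx hxq
          have hq' : q = f := by
            have hql := hminL q hq
            rw [mem_occL] at hq
            by_contra hne
            exact h q.toNat (by omega) hq.2.2
          have hp' : p = f := by
            have hpl := hminL p hp
            rw [mem_occL] at hp
            by_contra hne
            exact h p.toNat (by omega) hp.2.2
          have hx : x = f := by omega
          rw [hx]; exact hfm
        · -- IC → no occurrence after f
          intro hic j hj hpre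
          have hjfit := occ_fits word target j htsne hpre
          have hjm : ((j : Int)) ∈ occL word target := by
            rw [mem_occL]; exact ⟨by omega, by omega, hpre⟩
          have hmem : f + 1 ∈ occL word target :=
            hic f hfm (j : Int) hjm (f + 1) (by omega) (by omega)
          rw [mem_occL] at hmem
          rw [show (f + 1).toNat = f.toNat + 1 from by omega] at hmem
          exact hnoadj f.toNat hocc_f hmem.2.2
      · -- uniform target c^m
        rw [if_neg huni]
        -- occurrence at i ↔ window [i, i+m) is all c
        have hall : ∀ ch ∈ target.toList, ch = target.toList.headD ' ' := by
          intro ch hch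
          by_contra hne
          exact huni (List.any_eq_true.mpr ⟨ch, hch, by simpa using hne⟩)
        have hocc_char : ∀ i : Nat, target.toList <+: word.toList.drop i ↔
            (i + target.toList.length ≤ word.toList.length ∧
             ∀ k : Nat, i ≤ k → k < i + target.toList.length →
               word.toList[k]? = some (target.toList.headD ' ')) := by
          intro i
          constructor
          · intro h
            refine ⟨occ_fits word target i htsne h, ?_⟩
            intro k hk1 hk2
            have hpt := prefix_getElem h (k - i) (by omega)
            rw [List.getElem?_drop, show i + (k - i) = k from by omega] at hpt
            rw [hpt]
            congr 1
            exact hall _ (List.getElem_mem _)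
          · rintro ⟨hfit, hwin⟩
            rw [List.prefix_iff_eq_take]
            apply List.ext_getElem
            · rw [List.length_take, List.length_drop]; omega
            · intro k hk1 hk2
              rw [List.getElem_take, List.getElem_drop]
              have h1 : word.toList[i + k]? = some (target.toList.headD ' ') :=
                hwin (i + k) (by omega) (by omega)
              have h2 : word.toList[i + k]? = some (word.toList[i + k]'(by omega)) :=
                List.getElem?_eq_getElem (by omega)
              rw [h1] at h2
              rw [hall (target.toList[k]'hk1) (List.getElem_mem _)]
              exact Option.some.inj h2
        obtain ⟨hg1, hg2, hg3, hg4⟩ :=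
          runEndB_spec word.toList (target.toList.headD ' ')
            (((word.toList.length : Int) - (f + (target.toList.length : Int))).toNat)
            (f + (target.toList.length : Int)) (by omega) (by omega) (le_refl _)
        set g := runEndB word.toList (target.toList.headD ' ')
          (f + (target.toList.length : Int)) with hgdef
        -- every position in [f, g) holds the run character
        have hblock : ∀ k : Nat, f.toNat ≤ k → ((k : Int) < g) →
            word.toList[k]? = some (target.toList.headD ' ') := by
          intro k hk1 hk2
          by_cases hkm : k < f.toNat + target.toList.length
          · exact ((hocc_char f.toNat).mp hocc_f).2 k hk1 hkm
          · have hh := hg3 (k : Int) (by omega) hk2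
            rwa [show ((k : Int)).toNat = k from by omega] at hh
        -- occurrences fill [f, g - m]
        have hocc_in : ∀ x : Int, f ≤ x → x ≤ g - (target.toList.length : Int) →
            target.toList <+: word.toList.drop x.toNat := by
          intro x hx1 hx2
          rw [hocc_char]
          refine ⟨by omega, ?_⟩
          intro k hk1 hk2
          exact hblock k (by omega) (by omega)
        -- and no occurrence starts in (g - m, g]
        have hocc_split : ∀ j : Nat, target.toList <+: word.toList.drop j →
            ((j : Int) ≤ g - (target.toList.length : Int) ∨ g < (j : Int)) := by
          intro j hpre
          by_contra hcon
          push Not at hcon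
          rw [hocc_char] at hpre
          rcases hg4 with h | h
          · omega
          · refine h ?_
            have hh := hpre.2 g.toNat (by omega) (by omega)
            exact hh
        rw [PySem.Str.findFrom_eq]
        rw [show g = ((g.toNat : Nat) : Int) from by omega]
        rw [decide_eq_true_iff, findFrom_none_iff word target g.toNat (by omega)]
        constructor
        · -- no occurrence at or after g → IC
          intro h p hp q hq x hpx hxq
          have hpf := hminL p hp
          rw [mem_occL] at hq
          have hqs := hocc_split q.toNat hq.2.2
          have hq_le : q ≤ g - (target.toList.length : Int) := by
            rcases hqs with h' | h'
            · omega
            · exfalso; exact h q.toNat (by omega) hq.2.2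
          rw [mem_occL]
          exact ⟨by omega, by omega, hocc_in x (by omega) (by omega)⟩
        · -- IC → no occurrence at or after g
          intro hic j hj hpre
          rcases hocc_split j hpre with h | h
          · omega
          · have hjfit := occ_fits word target j htsne hpre
            have hjm : ((j : Int)) ∈ occL word target := by
              rw [mem_occL]; exact ⟨by omega, by omega, hpre⟩
            have hgm : ((g.toNat : Nat) : Int) ∈ occL word target :=
              hic f hfm (j : Int) hjm ((g.toNat : Nat) : Int) (by omega) (by omega)
            rw [mem_occL] at hgm
            rw [show (((g.toNat : Nat) : Int)).toNat = g.toNat from by omega] at hgm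
            rcases hocc_split g.toNat hgm.2.2 with h' | h'
            · omega
            · omega


-- ===== VERDICT (by name: the statement is the Claim_ definition above) =====
theorem find_spec : Claim_equal_find := by
  intro word target _
  unfold Spec_find
  rw [Bool.eq_iff_iff, find_iff, find_alt_iff]
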